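-- pv_equiv track=rewrite | github.com/8sd/PaStA | PaStA/Repository/Mbox.py | parse_single_message
-- ===== SOURCE A (Python) =====
-- def parse_single_message(mail):
--     mail = mail.splitlines()
--
--     valid = False
--
--     message = []
--     patch = []
--
--     for line in mail:
--         if line.startswith('diff '):
--             valid = True
--
--         if valid:
--             patch.append(line)
--         else:
--             message.append(line)
--
--     if valid:
--         return message, patch
--
--     return None
-- ===== SOURCE B (Python) =====
-- def parse_single_message(mail):
--     lines = mail.splitlines()
--     i = next((idx for idx, line in enumerate(lines) if line.startswith('diff ')), None)
--     if i is None: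
--         return None
--     return lines[:i], lines[i:]
-- ===== Notes on version B (the rewrite author's own statement) =====
-- stated objective: simpler
-- what changed: Replaces A's flag-routed per-line accumulation into two growing lists by locating the index of the first diff-marker line and returning the two slices around it.
import Mathlib
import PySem

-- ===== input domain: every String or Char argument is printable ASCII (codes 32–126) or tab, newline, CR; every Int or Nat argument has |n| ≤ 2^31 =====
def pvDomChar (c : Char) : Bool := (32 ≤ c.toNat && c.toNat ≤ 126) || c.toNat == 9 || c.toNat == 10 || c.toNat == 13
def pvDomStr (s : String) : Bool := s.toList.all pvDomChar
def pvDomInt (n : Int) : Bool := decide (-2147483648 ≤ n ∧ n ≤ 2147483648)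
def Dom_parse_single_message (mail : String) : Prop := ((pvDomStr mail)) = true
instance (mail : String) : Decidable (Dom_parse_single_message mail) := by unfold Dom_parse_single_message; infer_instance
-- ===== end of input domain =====

-- B replaces A's flag-routed accumulation by finding the first 'diff ' line index and slicing (objective: simpler).

-- ===== PORT A =====
-- A's for-loop: state (valid, message, patch), routed per line by the valid flag.
def parseLoopA : List String → Bool → List String → List String → (Bool × List String × List String)
  | [], valid, message, patch => (valid, message, patch)
  | line :: rest, valid, message, patch =>
    let valid' := if PySem.Str.startswith line "diff " then true else valid
    if valid' then parseLoopA rest valid' message (patch ++ [line])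
    else parseLoopA rest valid' (message ++ [line]) patch

def parse_single_message (mail : String) : Option (List String × List String) :=
  let mail' := PySem.Str.splitlines mail
  let r := parseLoopA mail' false [] []
  if r.1 then some (r.2.1, r.2.2) else none

-- ===== PORT B =====
def parse_single_message_alt (mail : String) : Option (List String × List String) :=
  let lines := PySem.Str.splitlines mail
  match lines.findIdx? (fun line => PySem.Str.startswith line "diff ") with
  | none => none
  | some i => some (lines.take i, lines.drop i)

-- ===== PRECONDITION & SPEC =====
def Spec_parse_single_message (mail : String) (out : Option (List String × List String)) : Prop := out = parse_single_message_alt mail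
instance (mail : String) (out : Option (List String × List String)) : Decidable (Spec_parse_single_message mail out) := by unfold Spec_parse_single_message; infer_instance

-- ===== CLAIM (what is proved, stated in full; the proofs are below) =====
def Claim_equal_parse_single_message : Prop := ∀ (mail : String), Dom_parse_single_message mail → Spec_parse_single_message mail (parse_single_message mail)

-- ===== LEMMAS AND PROOFS =====
-- Once valid is true, every remaining line goes to patch.
theorem parseLoopA_valid (ls : List String) (m p : List String) :
    parseLoopA ls true m p = (true, m, p ++ ls) := by
  induction ls generalizing p with
  | nil => simp [parseLoopA]
  | cons l rest ih => simp [parseLoopA, ih]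

-- While valid is false, the loop splits at the first 'diff ' line.
theorem parseLoopA_false (ls : List String) (m p : List String) :
    parseLoopA ls false m p =
      match ls.findIdx? (fun line => PySem.Str.startswith line "diff ") with
      | none => (false, m ++ ls, p)
      | some i => (true, m ++ ls.take i, p ++ ls.drop i) := by
  induction ls generalizing m with
  | nil => simp [parseLoopA]
  | cons l rest ih =>
    by_cases h : PySem.Str.startswith l "diff " = true
    · simp at h
      simp [parseLoopA, h, List.findIdx?_cons, parseLoopA_valid]
    · rw [Bool.not_eq_true] at h
      simp only [parseLoopA, h, Bool.false_eq_true, if_false]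
      rw [ih]
      simp only [List.findIdx?_cons, h, Bool.false_eq_true, if_false]
      cases hf : rest.findIdx? (fun line => PySem.Str.startswith line "diff ") with
      | none => simp [hf]
      | some i => simp [hf]

theorem parseLoopA_none (ls m p) (hf : ls.findIdx? (fun line => PySem.Str.startswith line "diff ") = none) :
    parseLoopA ls false m p = (false, m ++ ls, p) := by
  rw [parseLoopA_false, hf]

theorem parseLoopA_some (ls m p i) (hf : ls.findIdx? (fun line => PySem.Str.startswith line "diff ") = some i) :
    parseLoopA ls false m p = (true, m ++ ls.take i, p ++ ls.drop i) := by
  rw [parseLoopA_false, hf]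

theorem parse_eq (mail : String) :
    parse_single_message mail = parse_single_message_alt mail := by
  unfold parse_single_message parse_single_message_alt
  cases hf : (PySem.Str.splitlines mail).findIdx? (fun line => PySem.Str.startswith line "diff ") with
  | none => simp only [parseLoopA_none _ _ _ hf, hf, Bool.false_eq_true, if_false]
  | some i => simp only [parseLoopA_some _ _ _ _ hf, hf, if_true, List.nil_append]

-- ===== VERDICT (by name: the statement is the Claim_ definition above) =====
theorem parse_single_message_spec : Claim_equal_parse_single_message := by
  intro mail _
  unfold Spec_parse_single_message
  exact parse_eq mail
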